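-- pv_equiv track=rewrite | github.com/itsarvindhere/heap | 046. Mice and Cheese/Sorting.py | miceAndCheese
-- ===== SOURCE A (Python) =====
-- def miceAndCheese(reward1, reward2, k: int) -> int:
-- 	# Points
-- 	points = 0
--
-- 	# Types of cheese
-- 	n = len(reward1)
--
-- 	# Let's first combine the two lists into one
-- 	reward = [[reward1[i], reward2[i]] for i in range(n)]
--
-- 	# Now, we sort this list on the basis of "reward1[i] - reward2[i]" difference from maximum to minimum
-- 	reward.sort(key = lambda x : x[0] - x[1], reverse = True)
--
-- 	# First mouse eats "k" type of cheese
-- 	i = 0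
-- 	while i < k:
-- 		points += reward[i][0]
-- 		i += 1
--
-- 	# Now, the rest of the cheese is eaten by second mouse
-- 	while i < n:
-- 		points += reward[i][1]
-- 		i += 1
--
-- 	# Finally, return the points
-- 	return points
-- ===== SOURCE B (Python) =====
-- def miceAndCheese(reward1, reward2, k: int) -> int:
--     # Give every cheese to the second mouse, then reassign the k best gains
--     # reward1[i]-reward2[i] to the first mouse; the sum of the k largest gains
--     # is found by recursive three-way partitioning (quickselect), not by sorting.
--     total = 0
--     diffs = []
--     for a, b in zip(reward1, reward2):
--         total += b
--         diffs.append(a - b)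
--     return total + _top_sum(diffs, k)
--
--
-- def _top_sum(xs, k):
--     # sum of the k largest elements of xs (all of them if k >= len(xs))
--     if k <= 0 or not xs:
--         return 0
--     if k >= len(xs):
--         return sum(xs)
--     pivot = xs[len(xs) // 2]
--     hi = [x for x in xs if x > pivot]
--     lo = [x for x in xs if x < pivot]
--     neq = len(xs) - len(hi) - len(lo)
--     if k <= len(hi):
--         return _top_sum(hi, k)
--     if k <= len(hi) + neq:
--         return sum(hi) + (k - len(hi)) * pivot
--     return sum(hi) + neq * pivot + _top_sum(lo, k - len(hi) - neq)
-- ===== Notes on version B (the rewrite author's own statement) =====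
-- stated objective: faster
-- what changed: Instead of pairing the rewards, sorting the pair list by reward1[i]-reward2[i] with a key lambda and walking the sorted pairs in two index loops, B makes one zip pass accumulating sum(reward2) and the gain list reward1[i]-reward2[i], then adds the sum of the k largest gains computed by recursive three-way quickselect partitioning around a middle pivot (no sorting at all).
import Mathlib
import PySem

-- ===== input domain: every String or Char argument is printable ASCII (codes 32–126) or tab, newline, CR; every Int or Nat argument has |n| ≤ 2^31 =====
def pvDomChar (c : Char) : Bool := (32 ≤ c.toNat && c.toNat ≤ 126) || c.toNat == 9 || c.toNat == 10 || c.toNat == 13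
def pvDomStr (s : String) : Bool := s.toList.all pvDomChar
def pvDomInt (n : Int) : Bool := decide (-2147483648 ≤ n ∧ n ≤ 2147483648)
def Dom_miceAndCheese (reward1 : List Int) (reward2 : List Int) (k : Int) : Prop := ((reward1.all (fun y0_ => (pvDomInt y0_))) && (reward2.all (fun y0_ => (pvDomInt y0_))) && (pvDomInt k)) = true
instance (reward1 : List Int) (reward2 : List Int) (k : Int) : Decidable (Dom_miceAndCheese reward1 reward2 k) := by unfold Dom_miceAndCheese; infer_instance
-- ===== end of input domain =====

-- B replaces A's sort of the pair list (key lambda, two index loops over the sorted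
-- pairs) by: one pass summing reward2 and collecting the gains reward1[i]-reward2[i],
-- then the sum of the k largest gains by recursive three-way quickselect partitioning.

-- ===== PORT A =====
-- while i < k: points += reward[i][0]; i += 1
def pvLoop1 (reward : List (Int × Int)) (k : Int) (i : Int) (points : Int) : Int × Int :=
  if i < k then
    pvLoop1 reward k (i + 1) (points + (PySem.List.pyGetD reward i (0, 0)).1)
  else (i, points)
termination_by (k - i).toNat
decreasing_by omega

-- while i < n: points += reward[i][1]; i += 1
def pvLoop2 (reward : List (Int × Int)) (n : Int) (i : Int) (points : Int) : Int × Int :=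
  if i < n then
    pvLoop2 reward n (i + 1) (points + (PySem.List.pyGetD reward i (0, 0)).2)
  else (i, points)
termination_by (n - i).toNat
decreasing_by omega

def miceAndCheese (reward1 : List Int) (reward2 : List Int) (k : Int) : Int :=
  let n : Int := PySem.List.len reward1
  let reward : List (Int × Int) :=
    (PySem.List.pyRange 0 n 1).map
      (fun i => (PySem.List.pyGetD reward1 i 0, PySem.List.pyGetD reward2 i 0))
  let reward := PySem.List.sorted reward (fun x => x.1 - x.2) true
  let r1 := pvLoop1 reward k 0 0
  let r2 := pvLoop2 reward n r1.1 r1.2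
  r2.2

-- ===== PORT B =====
-- termination helper for pvTopSum, cited in its decreasing_by
theorem pv_mid_mem {xs : List Int} (h : xs ≠ []) : xs.getD (xs.length / 2) 0 ∈ xs := by
  have hlt : xs.length / 2 < xs.length :=
    Nat.div_lt_self (List.length_pos_of_ne_nil h) one_lt_two
  rw [List.getD_eq_getElem _ _ hlt]
  exact List.getElem_mem _

-- _top_sum: sum of the k largest elements of xs (all of them if k >= len(xs))
def pvTopSum (xs : List Int) (k : Int) : Int :=
  if k ≤ 0 ∨ xs = [] then 0
  else if (xs.length : Int) ≤ k then xs.sum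
  else
    -- pivot = xs[len(xs) // 2]: index always in range here, so plain getD is exact
    let pivot := xs.getD (xs.length / 2) 0
    let hi := xs.filter (fun x => pivot < x)
    let lo := xs.filter (fun x => x < pivot)
    let neq : Int := (xs.length : Int) - hi.length - lo.length
    if k ≤ (hi.length : Int) then pvTopSum hi k
    else if k ≤ (hi.length : Int) + neq then hi.sum + (k - hi.length) * pivot
    else hi.sum + neq * pivot + pvTopSum lo (k - hi.length - neq)
termination_by xs.length
decreasing_by
  · rename_i h0 _ _
    have hne : xs ≠ [] := fun hx => h0 (Or.inr hx)
    have h := (List.length_filter_lt_length_iff_exists (l := xs.attach)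
        (p := fun x : {a // a ∈ xs} => decide (xs.getD (xs.length / 2) 0 < (x : Int)))).mpr
      ⟨⟨_, pv_mid_mem hne⟩, List.mem_attach _ _, by simp⟩
    simpa using h
  · rename_i h0 _ _ _
    have hne : xs ≠ [] := fun hx => h0 (Or.inr hx)
    have h := (List.length_filter_lt_length_iff_exists (l := xs.attach)
        (p := fun x : {a // a ∈ xs} => decide ((x : Int) < xs.getD (xs.length / 2) 0))).mpr
      ⟨⟨_, pv_mid_mem hne⟩, List.mem_attach _ _, by simp⟩
    simpa using h

def miceAndCheese_alt (reward1 : List Int) (reward2 : List Int) (k : Int) : Int :=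
  -- for a, b in zip(reward1, reward2): total += b; diffs.append(a - b)
  let st := (List.zip reward1 reward2).foldl
    (fun (st : Int × List Int) p => (st.1 + p.2, st.2 ++ [p.1 - p.2])) (0, [])
  st.1 + pvTopSum st.2 k

-- ===== PRECONDITION & SPEC =====
-- A raises IndexError when reward2 is shorter than reward1 (building the pair list)
-- or when k exceeds len(reward1) (first while loop runs past the list).
def Pre_miceAndCheese (reward1 : List Int) (reward2 : List Int) (k : Int) : Prop :=
  reward1.length ≤ reward2.length ∧ k ≤ (reward1.length : Int)
instance (reward1 : List Int) (reward2 : List Int) (k : Int) : Decidable (Pre_miceAndCheese reward1 reward2 k) := by unfold Pre_miceAndCheese; infer_instance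

def pvWitness_miceAndCheese : List Int × List Int × Int := ([3, 1], [2, 4], 1)

def Spec_miceAndCheese (reward1 : List Int) (reward2 : List Int) (k : Int) (out : Int) : Prop := out = miceAndCheese_alt reward1 reward2 k
instance (reward1 : List Int) (reward2 : List Int) (k : Int) (out : Int) : Decidable (Spec_miceAndCheese reward1 reward2 k out) := by unfold Spec_miceAndCheese; infer_instance

-- ===== CLAIM (what is proved, stated in full; the proofs are below) =====
def Claim_equal_miceAndCheese : Prop := ∀ (reward1 : List Int) (reward2 : List Int) (k : Int), Dom_miceAndCheese reward1 reward2 k → Pre_miceAndCheese reward1 reward2 k → Spec_miceAndCheese reward1 reward2 k (miceAndCheese reward1 reward2 k)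

-- ===== LEMMAS AND PROOFS =====

-- a filter that drops at least one element is strictly shorter
theorem pv_filter_lt {xs : List Int} (p : Int) (hp : p ∈ xs) (q : Int → Bool)
    (hq : q p = false) : (xs.filter q).length < xs.length := by
  refine List.length_filter_lt_length_iff_exists.mpr ⟨p, hp, by simp [hq]⟩

-- descending sort of Ints (the proof's reference order)
def pvDesc (xs : List Int) : List Int := PySem.List.sorted xs (fun x => x) true

theorem pvDesc_perm (xs : List Int) : (pvDesc xs).Perm xs :=
  PySem.List.sorted_perm xs _ true

theorem pvDesc_pairwise (xs : List Int) : (pvDesc xs).Pairwise (fun a b => b ≤ a) :=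
  PySem.List.sorted_pairwise_rev xs _

theorem pvDesc_length (xs : List Int) : (pvDesc xs).length = xs.length :=
  (pvDesc_perm xs).length_eq

theorem pvDesc_nil : pvDesc [] = [] :=
  List.eq_nil_of_length_eq_zero (pvDesc_length [])

theorem pv_count_filter_zero (l : List Int) (a : Int) (q : Int → Bool)
    (h : q a = false) : (l.filter q).count a = 0 := by
  rw [List.count_eq_zero]; intro hm
  have := List.of_mem_filter hm; simp [h] at this

-- three-way partition is a permutation of the list
theorem pv_perm_three (xs : List Int) (p : Int) :
    xs.Perm (xs.filter (fun x => p < x) ++ xs.filter (fun x => x = p)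
      ++ xs.filter (fun x => x < p)) := by
  rw [List.perm_iff_count]; intro a
  simp only [List.count_append]
  rcases lt_trichotomy p a with h | h | h
  · rw [List.count_filter (by simp [h]), pv_count_filter_zero _ _ _ (by simp; omega),
      pv_count_filter_zero _ _ _ (by simp; omega)]; omega
  · rw [pv_count_filter_zero _ _ _ (by simp; omega), List.count_filter (by simp; omega),
      pv_count_filter_zero _ _ _ (by simp; omega)]; omega
  · rw [pv_count_filter_zero _ _ _ (by simp; omega), pv_count_filter_zero _ _ _ (by simp; omega),
      List.count_filter (by simp [h])]; omega

theorem pv_filter_eq_replicate (xs : List Int) (p : Int) :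
    xs.filter (fun x => x = p) = List.replicate (xs.count p) p := by
  exact List.filter_beq p

-- the descending sort decomposes along a three-way partition
theorem pvDesc_three (xs : List Int) (p : Int) :
    pvDesc xs = pvDesc (xs.filter (fun x => p < x))
      ++ List.replicate (xs.count p) p ++ pvDesc (xs.filter (fun x => x < p)) := by
  apply List.Perm.eq_of_pairwise (le := fun a b : Int => b ≤ a)
    (fun a b _ _ x y => le_antisymm y x)
  · exact pvDesc_pairwise xs
  · rw [List.pairwise_append]
    refine ⟨?_, pvDesc_pairwise _, ?_⟩
    · rw [List.pairwise_append]
      refine ⟨pvDesc_pairwise _, List.pairwise_replicate.mpr (by simp), ?_⟩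
      intro a ha b hb
      have ha' := List.of_mem_filter ((pvDesc_perm _).mem_iff.mp ha)
      have hb' := List.eq_of_mem_replicate hb
      simp at ha'
      omega
    · intro a ha b hb
      have hb' := List.of_mem_filter ((pvDesc_perm _).mem_iff.mp hb)
      simp at hb'
      rcases List.mem_append.mp ha with ha | ha
      · have ha' := List.of_mem_filter ((pvDesc_perm _).mem_iff.mp ha)
        simp at ha'
        omega
      · have ha' := List.eq_of_mem_replicate ha
        omega
  · refine (pvDesc_perm xs).trans ((pv_perm_three xs p).trans ?_)
    refine List.Perm.append (List.Perm.append (pvDesc_perm _).symm ?_) (pvDesc_perm _).symm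
    rw [pv_filter_eq_replicate]

-- counts: |hi| + count p + |lo| = |xs|
theorem pv_three_length (xs : List Int) (p : Int) :
    (xs.filter (fun x => p < x)).length + xs.count p
      + (xs.filter (fun x => x < p)).length = xs.length := by
  have h := (pv_perm_three xs p).length_eq
  rw [pv_filter_eq_replicate] at h
  simp [List.length_append] at h
  omega

-- pvTopSum computes the sum of the first k elements of the descending sort
theorem pvTopSum_spec : ∀ (n : Nat) (xs : List Int), xs.length ≤ n →
    ∀ k : Int, pvTopSum xs k = ((pvDesc xs).take k.toNat).sum := by
  intro n
  induction n with
  | zero =>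
    intro xs hx k
    have hnil : xs = [] := List.eq_nil_of_length_eq_zero (by omega)
    subst hnil
    rw [pvTopSum]
    simp [pvDesc_nil]
  | succ n ih =>
    intro xs hx k
    by_cases h0 : k ≤ 0 ∨ xs = []
    · rw [pvTopSum, if_pos h0]
      rcases h0 with h | h
      · simp [Int.toNat_of_nonpos h]
      · subst h; simp [pvDesc_nil]
    · push Not at h0
      obtain ⟨hk0, hne⟩ := h0
      by_cases h1 : (xs.length : Int) ≤ k
      · rw [pvTopSum, if_neg (by push Not; exact ⟨hk0, hne⟩), if_pos h1]
        rw [List.take_of_length_le (by rw [pvDesc_length]; omega), (pvDesc_perm xs).sum_eq]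
      · have hmem := pv_mid_mem hne
        set p := xs.getD (xs.length / 2) 0 with hp
        set hi := xs.filter (fun x => p < x) with hhi
        set lo := xs.filter (fun x => x < p) with hlo
        set cnt := xs.count p with hcntdef
        have hcnt : hi.length + cnt + lo.length = xs.length := pv_three_length xs p
        have hdesc := pvDesc_three xs p
        rw [← hhi, ← hlo, ← hcntdef] at hdesc
        have hhilen : hi.length < xs.length := pv_filter_lt p hmem _ (by simp)
        have hlolen : lo.length < xs.length := pv_filter_lt p hmem _ (by simp)
        have hdhl : (pvDesc hi).length = hi.length := pvDesc_length hi
        rw [pvTopSum]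
        rw [if_neg (by push Not; exact ⟨hk0, hne⟩), if_neg h1]
        simp only [← hp, ← hhi, ← hlo]
        have hneq : (xs.length : Int) - hi.length - lo.length = (cnt : Int) := by omega
        rw [hneq]
        by_cases h2 : k ≤ (hi.length : Int)
        · rw [if_pos h2, ih hi (by omega) k, hdesc, List.append_assoc,
            List.take_append_of_le_length (by rw [hdhl]; omega)]
        · rw [if_neg h2]
          have hksub : (k.toNat - (pvDesc hi).length : Nat) = (k - hi.length).toNat := by
            rw [hdhl]; omega
          by_cases h3 : k ≤ (hi.length : Int) + (cnt : Int)
          · rw [if_pos h3, hdesc, List.append_assoc, List.take_append,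
              List.take_of_length_le (by rw [hdhl]; omega),
              List.take_append, hksub, List.take_replicate,
              List.length_replicate]
            have hz : ((k - hi.length).toNat - cnt : Nat) = 0 := by omega
            have hmin : min (k - hi.length).toNat cnt = (k - hi.length).toNat := by omega
            rw [hz, hmin, List.take_zero, List.sum_append, List.sum_append,
              (pvDesc_perm hi).sum_eq, List.sum_replicate]
            simp
            left
            omega
          · rw [if_neg h3, hdesc, List.append_assoc, List.take_append,
              List.take_of_length_le (by rw [hdhl]; omega),
              List.take_append, hksub, List.take_replicate,
              List.length_replicate]
            have hmin : min (k - hi.length).toNat cnt = cnt := by omega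
            have hrest : ((k - hi.length).toNat - cnt : Nat) = (k - hi.length - cnt).toNat := by
              omega
            rw [hmin, hrest, ih lo (by omega) (k - hi.length - cnt), List.sum_append,
              List.sum_append, (pvDesc_perm hi).sum_eq, List.sum_replicate]
            simp
            ring

-- B's single zip pass, characterised
theorem pv_fold_eq (l : List (Int × Int)) (t : Int) (acc : List Int) :
    l.foldl (fun (st : Int × List Int) p => (st.1 + p.2, st.2 ++ [p.1 - p.2])) (t, acc)
      = (t + (l.map Prod.snd).sum, acc ++ l.map (fun p => p.1 - p.2)) := by
  induction l generalizing t acc with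
  | nil => simp
  | cons x xs ih => rw [List.foldl_cons, ih]; simp; ring

-- zip(reward1, reward2) is A's pair list when reward2 is long enough
theorem pv_zip_eq (r1 r2 : List Int) (h : r1.length ≤ r2.length) :
    List.zip r1 r2 = (PySem.List.pyRange 0 (r1.length : Int) 1).map
      (fun i => (PySem.List.pyGetD r1 i 0, PySem.List.pyGetD r2 i 0)) := by
  rw [PySem.List.pyRange_zero_natCast, List.map_map]
  apply List.ext_getElem
  · simp; omega
  · intro i h1 h2
    simp at h1
    simp [List.getElem_zip, List.getD_eq_getElem?_getD, h1]

theorem map_pyGetD_window {α : Type} (xs : List α) (d : α) (a0 m : Nat)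
    (h : a0 + m ≤ xs.length) :
    (List.range m).map (fun j => xs.getD (a0 + j) d) = (xs.drop a0).take m := by
  induction m with
  | zero => simp
  | succ m ih =>
    rw [List.range_succ, List.map_append, ih (by omega), List.take_add_one]
    simp only [List.map_cons, List.map_nil]
    have hlt : a0 + m < xs.length := by omega
    have : (xs.drop a0)[m]? = some xs[a0 + m] := by
      rw [List.getElem?_drop]
      exact List.getElem?_eq_getElem (by omega)
    rw [this]
    simp [List.getD, hlt]

theorem sum_map_dif (l : List (Int × Int)) :
    (l.map (fun p => p.1 - p.2)).sum = (l.map Prod.fst).sum - (l.map Prod.snd).sum := by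
  induction l with
  | nil => simp
  | cons x xs ih => simp [ih]; ring

theorem sorted_dif_eq (pairs : List (Int × Int)) :
    pvDesc (pairs.map (fun p => p.1 - p.2))
      = (PySem.List.sorted pairs (fun p => p.1 - p.2) true).map (fun p => p.1 - p.2) := by
  apply List.Perm.eq_of_pairwise (le := fun a b : Int => b ≤ a)
  · exact fun a b _ _ h1 h2 => le_antisymm h2 h1
  · exact PySem.List.sorted_pairwise_rev _ _
  · exact List.Pairwise.map _ (fun a b h => h) (PySem.List.sorted_pairwise_rev pairs _)
  · exact (PySem.List.sorted_perm _ _ _).trans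
      (((PySem.List.sorted_perm pairs _ true).map _).symm)

-- pvLoop1 adds first components of reward over indices [i, k); final i is max i k.
theorem pvLoop1_eq (reward : List (Int × Int)) (k i points : Int) :
    pvLoop1 reward k i points =
      (max i k,
       points + ((PySem.List.pyRange i k 1).map
         (fun j => (PySem.List.pyGetD reward j (0, 0)).1)).sum) := by
  generalize hm : (k - i).toNat = m
  induction m generalizing i points with
  | zero =>
    rw [pvLoop1]
    have h : ¬ i < k := by omega
    simp [h, PySem.List.pyRange_one_eq_nil (by omega : k ≤ i)]
    omega
  | succ m ih =>
    have hik : i < k := by omega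
    rw [pvLoop1]
    simp only [if_pos hik]
    rw [ih _ _ (by omega)]
    rw [PySem.List.pyRange_one_cons hik]
    simp only [List.map_cons, List.sum_cons]
    rw [Prod.ext_iff]
    constructor
    · simp; omega
    · simp; ring

-- pvLoop2 likewise with second components up to n.
theorem pvLoop2_eq (reward : List (Int × Int)) (n i points : Int) :
    pvLoop2 reward n i points =
      (max i n,
       points + ((PySem.List.pyRange i n 1).map
         (fun j => (PySem.List.pyGetD reward j (0, 0)).2)).sum) := by
  generalize hm : (n - i).toNat = m
  induction m generalizing i points with
  | zero =>
    rw [pvLoop2]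
    have h : ¬ i < n := by omega
    simp [h, PySem.List.pyRange_one_eq_nil (by omega : n ≤ i)]
    omega
  | succ m ih =>
    have hik : i < n := by omega
    rw [pvLoop2]
    simp only [if_pos hik]
    rw [ih _ _ (by omega)]
    rw [PySem.List.pyRange_one_cons hik]
    simp only [List.map_cons, List.sum_cons]
    rw [Prod.ext_iff]
    constructor
    · simp; omega
    · simp; ring

theorem main (reward1 : List Int) (reward2 : List Int) (k : Int)
    (hlen : reward1.length ≤ reward2.length)
    (hk : k ≤ (reward1.length : Int)) :
    miceAndCheese reward1 reward2 k = miceAndCheese_alt reward1 reward2 k := by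
  simp only [miceAndCheese, miceAndCheese_alt, PySem.List.len_eq, pvLoop1_eq, pvLoop2_eq,
    pv_zip_eq reward1 reward2 hlen, pv_fold_eq, List.nil_append]
  set n : Nat := reward1.length with hn
  set pairs : List (Int × Int) := (PySem.List.pyRange 0 (n : Int) 1).map
      (fun i => (PySem.List.pyGetD reward1 i 0, PySem.List.pyGetD reward2 i 0)) with hpairs
  set P := PySem.List.sorted pairs (fun x => x.1 - x.2) true with hP
  have hPlen : P.length = n := by
    rw [hP, PySem.List.length_sorted, hpairs, List.length_map,
      PySem.List.length_pyRange_one]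
    omega
  -- B's top-sum is the take of the descending diff sort = take of P mapped
  have htop : pvTopSum (pairs.map (fun p => p.1 - p.2)) k
      = ((P.take k.toNat).map (fun p => p.1 - p.2)).sum := by
    rw [pvTopSum_spec (pairs.map (fun p => p.1 - p.2)).length _ le_rfl k,
      sorted_dif_eq, ← hP, ← List.map_take]
  -- sum of snd over sorted = sum of snd over pairs
  have hsnd : (P.map Prod.snd).sum = (pairs.map Prod.snd).sum :=
    ((PySem.List.sorted_perm _ _ _).map _).sum_eq
  have window : ∀ (a b : Int), 0 ≤ a → a ≤ b → b ≤ (P.length : Int) →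
      (PySem.List.pyRange a b 1).map (fun j => PySem.List.pyGetD P j ((0:Int),(0:Int)))
        = (P.drop a.toNat).take (b - a).toNat := by
    intro a b ha hab hb
    rw [PySem.List.pyRange_one, List.map_map]
    have hcg : ∀ j ∈ List.range (b - a).toNat,
        ((fun j => PySem.List.pyGetD P j ((0:Int),(0:Int))) ∘ (fun k : Nat => a + (k:Int))) j
          = P.getD (a.toNat + j) ((0:Int),(0:Int)) := by
      intro j hj
      have hcast : a + (j : Int) = ((a.toNat + j : Nat) : Int) := by omega
      simp only [Function.comp, hcast, PySem.List.pyGetD_natCast]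
    rw [List.map_congr_left hcg]
    exact map_pyGetD_window P _ _ _ (by omega)
  rw [htop]
  by_cases hkpos : 0 < k
  · have hmax : max (0:Int) k = k := by omega
    rw [hmax]
    have h1 : (PySem.List.pyRange 0 k 1).map (fun j => (PySem.List.pyGetD P j ((0:Int),(0:Int))).1)
        = (P.take k.toNat).map Prod.fst := by
      rw [show (fun j => (PySem.List.pyGetD P j ((0:Int),(0:Int))).1)
            = Prod.fst ∘ (fun j => PySem.List.pyGetD P j ((0:Int),(0:Int))) from rfl,
        ← List.map_map, window 0 k le_rfl (by omega) (by omega)]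
      simp
    have h2 : (PySem.List.pyRange k (n : Int) 1).map (fun j => (PySem.List.pyGetD P j ((0:Int),(0:Int))).2)
        = (P.drop k.toNat).map Prod.snd := by
      rw [show (fun j => (PySem.List.pyGetD P j ((0:Int),(0:Int))).2)
            = Prod.snd ∘ (fun j => PySem.List.pyGetD P j ((0:Int),(0:Int))) from rfl,
        ← List.map_map, window k (n : Int) (by omega) (by omega) (by omega)]
      rw [List.take_of_length_le (by simp [hPlen]; omega)]
    rw [h1, h2]
    have hsplit : ((P.take k.toNat).map Prod.snd).sum + ((P.drop k.toNat).map Prod.snd).sum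
        = (P.map Prod.snd).sum := by
      rw [← List.sum_append, ← List.map_append, List.take_append_drop]
    rw [sum_map_dif]
    rw [hsnd] at hsplit
    linarith
  · have hmax : max (0:Int) k = 0 := by omega
    rw [hmax, PySem.List.pyRange_one_eq_nil (by omega : k ≤ 0)]
    have h2 : (PySem.List.pyRange 0 (n : Int) 1).map (fun j => (PySem.List.pyGetD P j ((0:Int),(0:Int))).2)
        = P.map Prod.snd := by
      rw [show (fun j => (PySem.List.pyGetD P j ((0:Int),(0:Int))).2)
            = Prod.snd ∘ (fun j => PySem.List.pyGetD P j ((0:Int),(0:Int))) from rfl,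
        ← List.map_map, window 0 (n : Int) le_rfl (by omega) (by omega)]
      simp [List.take_of_length_le, hPlen]
    rw [h2]
    have hkz : k.toNat = 0 := by omega
    simp [hkz, hsnd]

-- ===== VERDICT (by name: the statement is the Claim_ definition above) =====
theorem miceAndCheese_spec : Claim_equal_miceAndCheese := by
  intro reward1 reward2 k _ hpre
  exact main reward1 reward2 k hpre.1 hpre.2
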